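-- pv_equiv track=rewrite | github.com/vshkodin/problem-solving-with-algorithms-and-data-structures-using-python | NumberOfStepstoReduceANumberToZero.py | func
-- ===== SOURCE A (Python) =====
-- def func(num):
--     output=0
--     while True:
--         if num==0:
--             break
--         else:
--             if num % 2 ==0:
--                 output+=1
--                 num=num//2
--             else:
--                 output+=1
--                 num=num-1
--     return output
-- ===== SOURCE B (Python) =====
-- def func(num):
--     if num == 0:
--         return 0
--     return num.bit_length() + bin(num).count('1') - 1
-- ===== Notes on version B (the rewrite author's own statement) =====
-- stated objective: simpler
-- what changed: Replaces the step-by-step halving/decrement loop with the closed form bit_length(num) + popcount(num) - 1, guarding num == 0.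
import Mathlib
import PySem

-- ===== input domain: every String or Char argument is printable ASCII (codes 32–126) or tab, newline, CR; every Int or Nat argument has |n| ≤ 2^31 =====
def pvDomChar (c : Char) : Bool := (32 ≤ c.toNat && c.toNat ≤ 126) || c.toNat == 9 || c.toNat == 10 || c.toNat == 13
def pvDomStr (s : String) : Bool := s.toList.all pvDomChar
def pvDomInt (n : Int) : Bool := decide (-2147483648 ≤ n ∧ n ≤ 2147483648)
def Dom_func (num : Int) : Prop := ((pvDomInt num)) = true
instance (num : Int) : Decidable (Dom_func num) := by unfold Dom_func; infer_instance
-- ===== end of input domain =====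

-- B replaces A's halving/decrement loop by the closed form bit_length + popcount - 1 (guarding num == 0).

-- ===== PORT A =====
-- A's 'while True' loop; the fuel argument is only a totality guard (2*num+1 steps
-- always suffice for num ≥ 0; on negative num the Python loop never terminates,
-- and such inputs are excluded by Pre_func).
def funcGo : Nat → Int → Int → Int
  | 0, _, out => out
  | f + 1, num, out =>
    if num = 0 then out
    else if PySem.Int.mod num 2 = 0 then funcGo f (PySem.Int.floordiv num 2) (out + 1)
    else funcGo f (num - 1) (out + 1)

def func (num : Int) : Int := funcGo (2 * num.natAbs + 1) num 0

-- ===== PORT B =====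
-- num.bit_length() (Python: bit length of |num|)
def bitLen : Nat → Nat
  | 0 => 0
  | n + 1 => bitLen ((n + 1) / 2) + 1
decreasing_by exact Nat.div_lt_self (Nat.succ_pos n) one_lt_two

-- bin(num).count('1') (Python: number of set bits of |num|)
def popCnt : Nat → Nat
  | 0 => 0
  | n + 1 => popCnt ((n + 1) / 2) + (n + 1) % 2
decreasing_by exact Nat.div_lt_self (Nat.succ_pos n) one_lt_two

def func_alt (num : Int) : Int :=
  if num = 0 then 0 else (bitLen num.natAbs : Int) + (popCnt num.natAbs : Int) - 1

-- ===== PRECONDITION & SPEC =====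
-- Pre_ excludes negative num, on which A's while-loop never terminates (no return value).
def Pre_func (num : Int) : Prop := 0 ≤ num
instance (num : Int) : Decidable (Pre_func num) := by unfold Pre_func; infer_instance
def pvWitness_func : Int := (6)

def Spec_func (num : Int) (out : Int) : Prop := out = func_alt num
instance (num : Int) (out : Int) : Decidable (Spec_func num out) := by unfold Spec_func; infer_instance

-- ===== CLAIM (what is proved, stated in full; the proofs are below) =====
def Claim_equal_func : Prop := ∀ (num : Int), Dom_func num → Pre_func num → Spec_func num (func num)

-- ===== LEMMAS AND PROOFS =====

-- the closed form, on Nat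
def F (n : Nat) : Int := if n = 0 then 0 else (bitLen n : Int) + (popCnt n : Int) - 1

lemma bitLen_pos_eq (n : Nat) (h : 0 < n) : bitLen n = bitLen (n / 2) + 1 := by
  obtain ⟨m, rfl⟩ := Nat.exists_eq_succ_of_ne_zero (Nat.pos_iff_ne_zero.mp h)
  rw [show m.succ = m + 1 from rfl, bitLen]

lemma popCnt_pos_eq (n : Nat) (h : 0 < n) : popCnt n = popCnt (n / 2) + n % 2 := by
  obtain ⟨m, rfl⟩ := Nat.exists_eq_succ_of_ne_zero (Nat.pos_iff_ne_zero.mp h)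
  rw [show m.succ = m + 1 from rfl, popCnt]

lemma mod_cast_two (n : Nat) : PySem.Int.mod (n : Int) 2 = ((n % 2 : Nat) : Int) := by
  exact_mod_cast PySem.Int.mod_natCast n 2

lemma fdiv_cast_two (n : Nat) : PySem.Int.floordiv (n : Int) 2 = ((n / 2 : Nat) : Int) := by
  exact_mod_cast PySem.Int.floordiv_natCast n 2

lemma go_eq (n : Nat) : ∀ f out, 2 * n + 1 ≤ f → funcGo f (n : Int) out = out + F n := by
  induction n using Nat.strong_induction_on with
  | _ n ih =>
    intro f out hf
    obtain ⟨f', rfl⟩ : ∃ f', f = f' + 1 := ⟨f - 1, by omega⟩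
    by_cases hn : n = 0
    · subst hn; simp [funcGo, F]
    · have hnpos : 0 < n := Nat.pos_of_ne_zero hn
      rw [funcGo]
      rw [if_neg (by exact_mod_cast hn), mod_cast_two, fdiv_cast_two]
      by_cases he : n % 2 = 0
      · -- even branch
        rw [if_pos (by exact_mod_cast he)]
        have hlt : n / 2 < n := Nat.div_lt_self hnpos one_lt_two
        rw [ih (n / 2) hlt f' (out + 1) (by omega)]
        have h2 : 0 < n / 2 := by omega
        simp only [F, if_neg hn, if_neg (Nat.pos_iff_ne_zero.mp h2),
          bitLen_pos_eq n hnpos, popCnt_pos_eq n hnpos, he]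
        push_cast
        ring
      · -- odd branch
        have he1 : n % 2 = 1 := by omega
        rw [if_neg (show ¬((n % 2 : Nat) : Int) = 0 by exact_mod_cast he)]
        have hcast : (n : Int) - 1 = ((n - 1 : Nat) : Int) := by omega
        rw [hcast, ih (n - 1) (by omega) f' (out + 1) (by omega)]
        by_cases h1 : n = 1
        · subst h1; simp [F, bitLen, popCnt]
        · have hm : 0 < n - 1 := by omega
          have hdiv : (n - 1) / 2 = n / 2 := by omega
          simp only [F, if_neg hn, if_neg (Nat.pos_iff_ne_zero.mp hm),
            bitLen_pos_eq n hnpos, popCnt_pos_eq n hnpos,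
            bitLen_pos_eq (n - 1) hm, popCnt_pos_eq (n - 1) hm, hdiv, he1]
        
          have he2 : (n - 1) % 2 = 0 := by omega
          rw [he2]
          push_cast
          ring

-- ===== VERDICT (by name: the statement is the Claim_ definition above) =====
theorem func_spec : Claim_equal_func := by
  intro num _ hpre
  obtain ⟨n, rfl⟩ := Int.eq_ofNat_of_zero_le hpre
  show func (n : Int) = func_alt (n : Int)
  rw [func_alt]
  rw [func]
  rw [show ((n : Int)).natAbs = n from Int.natAbs_natCast n]
  rw [go_eq n (2 * n + 1) 0 (le_refl _)]
  by_cases hn : n = 0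
  · subst hn; simp [F]
  · rw [if_neg (by exact_mod_cast hn)]
    simp [F, hn]
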